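-- pv_equiv track=rewrite | github.com/trhuyyy13/day19_2A202600303 | src/graph_rag.py | detect_seed_entity
-- ===== SOURCE A (Python) =====
-- def detect_seed_entity(query: str, nodes) -> str | None:
--     query_lower = query.lower()
--     sorted_nodes = sorted(nodes, key=lambda node: len(str(node)), reverse=True)
--     for node in sorted_nodes:
--         if str(node).lower() in query_lower:
--             return node
--
--     query_terms = set(query_lower.replace("?", "").split())
--     best_node = None
--     best_score = 0
--     for node in nodes:
--         node_terms = set(str(node).lower().split())
--         score = len(query_terms & node_terms)
--         if score > best_score:
--             best_node = node
--             best_score = score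
--     return best_node if best_score > 0 else None
-- ===== SOURCE B (Python) =====
-- def detect_seed_entity(query: str, nodes) -> str | None:
--     # One pass, no sort: track the longest substring-matching node (first wins on ties,
--     # matching A's stable descending sort) and the best term-overlap node simultaneously.
--     query_lower = query.lower()
--     query_terms = set(query_lower.replace("?", "").split())
--     best_sub = None
--     best_sub_len = -1
--     best_node = None
--     best_score = 0
--     for node in nodes:
--         s = str(node)
--         if len(s) > best_sub_len and s.lower() in query_lower:
--             best_sub = node
--             best_sub_len = len(s)
--         score = len(query_terms & set(s.lower().split()))
--         if score > best_score:
--             best_node = node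
--             best_score = score
--     if best_sub is not None:
--         return best_sub
--     return best_node if best_score > 0 else None
-- ===== Notes on version B (the rewrite author's own statement) =====
-- stated objective: alternative
-- what changed: B replaces A's two phases (stable sort by length descending then scan for the first substring match, plus a second scan for term overlap) with a single fused pass that tracks the longest substring-matching node (strict > keeps the first on ties, reproducing the stable descending sort's tie-break) and the best-overlap node simultaneously; it trades A's early return in phase 1 for sort-free single-traversal code, so it is not faster in practice.
import Mathlib
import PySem

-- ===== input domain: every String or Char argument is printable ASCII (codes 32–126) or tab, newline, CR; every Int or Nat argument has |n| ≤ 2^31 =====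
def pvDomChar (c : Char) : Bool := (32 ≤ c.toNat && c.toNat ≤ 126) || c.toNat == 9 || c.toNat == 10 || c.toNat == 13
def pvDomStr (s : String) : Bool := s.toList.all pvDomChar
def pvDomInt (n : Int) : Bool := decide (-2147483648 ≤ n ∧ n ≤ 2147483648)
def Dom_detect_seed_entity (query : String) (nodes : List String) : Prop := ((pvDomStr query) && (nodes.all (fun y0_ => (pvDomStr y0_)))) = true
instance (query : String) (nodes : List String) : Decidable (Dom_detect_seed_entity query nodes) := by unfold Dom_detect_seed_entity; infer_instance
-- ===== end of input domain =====

-- B replaces A's sort-then-scan plus second scan with one sort-free fused pass over the nodes (alternative decomposition, same results; not claimed faster).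

-- ===== PORT A =====
-- the 'for node in sorted_nodes: if … return node' loop (early return)
def pvFirstContained (ql : String) : List String → Option String
  | [] => none
  | n :: rest =>
    if PySem.Str.isIn (PySem.Str.lower n) ql then some n else pvFirstContained ql rest

def detect_seed_entity (query : String) (nodes : List String) : Option String :=
  let query_lower := PySem.Str.lower query
  let sorted_nodes := PySem.List.sorted nodes (fun node => (PySem.Str.len node : Int)) true
  match pvFirstContained query_lower sorted_nodes with
  | some n => some n
  | none =>
    let query_terms := PySem.Set.ofList (PySem.Str.split₀ (PySem.Str.replace query_lower "?" ""))
    let st := nodes.foldl (fun (st : Option String × Int) node =>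
        let node_terms := PySem.Set.ofList (PySem.Str.split₀ (PySem.Str.lower node))
        let score : Int := (PySem.Set.len (PySem.Set.inter query_terms node_terms) : Int)
        if score > st.2 then (some node, score) else st) (none, 0)
    if st.2 > 0 then st.1 else none

-- ===== PORT B =====
def detect_seed_entity_alt (query : String) (nodes : List String) : Option String :=
  let query_lower := PySem.Str.lower query
  let query_terms := PySem.Set.ofList (PySem.Str.split₀ (PySem.Str.replace query_lower "?" ""))
  let st := nodes.foldl (fun (st : (Option String × Int) × (Option String × Int)) node =>
      let s1 := if (PySem.Str.len node : Int) > st.1.2 ∧ PySem.Str.isIn (PySem.Str.lower node) query_lower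
                then (some node, (PySem.Str.len node : Int)) else st.1
      let score : Int := (PySem.Set.len (PySem.Set.inter query_terms (PySem.Set.ofList (PySem.Str.split₀ (PySem.Str.lower node)))) : Int)
      let s2 := if score > st.2.2 then (some node, score) else st.2
      (s1, s2)) ((none, -1), (none, 0))
  match st.1.1 with
  | some n => some n
  | none => if st.2.2 > 0 then st.2.1 else none

-- ===== PRECONDITION & SPEC =====
def Spec_detect_seed_entity (query : String) (nodes : List String) (out : Option String) : Prop := out = detect_seed_entity_alt query nodes
instance (query : String) (nodes : List String) (out : Option String) : Decidable (Spec_detect_seed_entity query nodes out) := by unfold Spec_detect_seed_entity; infer_instance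

-- ===== CLAIM (what is proved, stated in full; the proofs are below) =====
def Claim_equal_detect_seed_entity : Prop := ∀ (query : String) (nodes : List String), Dom_detect_seed_entity query nodes → Spec_detect_seed_entity query nodes (detect_seed_entity query nodes)

-- ===== LEMMAS AND PROOFS =====

-- the early-return loop is find?
theorem pvFirstContained_eq_find? (ql : String) (l : List String) :
    pvFirstContained ql l = l.find? (fun n => PySem.Str.isIn (PySem.Str.lower n) ql) := by
  induction l with
  | nil => rfl
  | cons n rest ih =>
    simp only [pvFirstContained, List.find?]
    cases h : PySem.Chars.isIn (PySem.Chars.lower n.toList) ql.toList <;> simp [h, ih]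

-- find? through a (descending, stable) insertion step
theorem pvFind?_insertBy (P : String → Bool) (klen : String → Int) (x : String) (ys : List String)
    (hpw : ys.Pairwise (fun a b => klen b ≤ klen a)) :
    (PySem.List.insertBy (fun a b => decide (klen b < klen a)) x ys).find? P =
      match ys.find? P with
      | some m => if P x = true ∧ klen m < klen x then some x else some m
      | none => if P x then some x else none := by
  induction ys with
  | nil =>
    simp only [PySem.List.insertBy, List.find?]
    cases hpx : P x <;> simp
  | cons y ys ih =>
    have hy : ∀ b ∈ ys, klen b ≤ klen y := (List.pairwise_cons.mp hpw).1
    have htl : ys.Pairwise (fun a b => klen b ≤ klen a) := (List.pairwise_cons.mp hpw).2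
    by_cases hlt : klen y < klen x
    · have hstep : PySem.List.insertBy (fun a b => decide (klen b < klen a)) x (y :: ys)
          = x :: y :: ys := by
        simp [PySem.List.insertBy, hlt]
      rw [hstep]
      cases hpx : P x with
      | false =>
        rw [List.find?_cons_of_neg (by simp [hpx])]
        cases hfy : List.find? P (y :: ys) <;> simp
      | true =>
        rw [List.find?_cons_of_pos (by simp [hpx])]
        cases hfy : List.find? P (y :: ys) with
        | none => simp
        | some m =>
          have hm : m ∈ y :: ys := List.mem_of_find?_eq_some hfy
          have hmk : klen m ≤ klen y := by
            rcases List.mem_cons.mp hm with h | h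
            · exact h ▸ le_refl _
            · exact hy m h
          have hlt2 : klen m < klen x := lt_of_le_of_lt hmk hlt
          simp [hlt2]
    · have hstep : PySem.List.insertBy (fun a b => decide (klen b < klen a)) x (y :: ys)
          = y :: PySem.List.insertBy (fun a b => decide (klen b < klen a)) x ys := by
        simp [PySem.List.insertBy, hlt]
      rw [hstep]
      cases hpy : P y with
      | true =>
        rw [List.find?_cons_of_pos (p := P) hpy, List.find?_cons_of_pos (p := P) hpy]
        simp [hlt]
      | false =>
        rw [List.find?_cons_of_neg (by simp [hpy]), List.find?_cons_of_neg (by simp [hpy])]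
        exact ih htl

-- a fold over a product whose components do not interact splits
theorem pvFoldSplit {α β γ : Type} (f : α → γ → α) (g : β → γ → β) (l : List γ) (a : α) (b : β) :
    l.foldl (fun st x => (f st.1 x, g st.2 x)) (a, b) = (l.foldl f a, l.foldl g b) := by
  induction l generalizing a b with
  | nil => rfl
  | cons x xs ih => simpa using ih (f a x) (g b x)

-- B's first component computes the first match of A's stable descending sort
theorem pvPhase1 (ql : String) (l : List String) :
    l.foldl (fun (st : Option String × Int) n =>
        if (PySem.Str.len n : Int) > st.2 ∧ PySem.Str.isIn (PySem.Str.lower n) ql = true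
        then (some n, (PySem.Str.len n : Int)) else st) ((none : Option String), (-1 : Int))
    = match (PySem.List.sorted l (fun n => (PySem.Str.len n : Int)) true).find?
              (fun n => PySem.Str.isIn (PySem.Str.lower n) ql) with
      | some m => (some m, (PySem.Str.len m : Int))
      | none => ((none : Option String), (-1 : Int)) := by
  induction l using List.reverseRecOn with
  | nil => rfl
  | append_singleton l x ih =>
    rw [List.foldl_append, ih]
    have hsorted : PySem.List.sorted (l ++ [x]) (fun n => (PySem.Str.len n : Int)) true
        = PySem.List.insertBy (fun a b => decide ((PySem.Str.len b : Int) < (PySem.Str.len a : Int))) x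
            (PySem.List.sorted l (fun n => (PySem.Str.len n : Int)) true) := by
      rw [PySem.List.sorted_rev_eq_foldl_insertBy, PySem.List.sorted_rev_eq_foldl_insertBy,
        List.foldl_append]
      rfl
    rw [hsorted, pvFind?_insertBy _ _ _ _ (PySem.List.sorted_pairwise_rev l _)]
    cases hf : (PySem.List.sorted l (fun n => (PySem.Str.len n : Int)) true).find?
        (fun n => PySem.Str.isIn (PySem.Str.lower n) ql) with
    | none =>
      have hx : (-1 : Int) < (x.length : Int) := by
        have h0 : (0 : Int) ≤ (x.length : Int) := Int.natCast_nonneg _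
        omega
      by_cases hpx : PySem.Chars.isIn (PySem.Chars.lower x.toList) ql.toList = true
      · simp [hpx, hx]
      · simp [hpx]
    | some m =>
      by_cases hpx : PySem.Chars.isIn (PySem.Chars.lower x.toList) ql.toList = true
      · by_cases hlen : ((m.length : Int) < (x.length : Int))
        · simp [hpx, hlen]
        · simp [hpx, hlen]
      · simp [hpx]

-- ===== VERDICT (by name: the statement is the Claim_ definition above) =====
set_option maxHeartbeats 1000000 in
theorem detect_seed_entity_spec : Claim_equal_detect_seed_entity := by
  intro query nodes _
  unfold Spec_detect_seed_entity detect_seed_entity detect_seed_entity_alt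
  simp only [pvFirstContained_eq_find?]
  have hsplit := pvFoldSplit
    (fun (st : Option String × Int) (node : String) =>
      if PySem.Str.len node > st.2 ∧ PySem.Str.isIn (PySem.Str.lower node) (PySem.Str.lower query) = true
      then (some node, PySem.Str.len node) else st)
    (fun (st : Option String × Int) (node : String) =>
      if ((PySem.Set.ofList (PySem.Str.split₀ (PySem.Str.replace (PySem.Str.lower query) "?" ""))).inter
            (PySem.Set.ofList (PySem.Str.split₀ (PySem.Str.lower node)))).len > st.2
      then (some node, ((PySem.Set.ofList (PySem.Str.split₀ (PySem.Str.replace (PySem.Str.lower query) "?" ""))).inter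
            (PySem.Set.ofList (PySem.Str.split₀ (PySem.Str.lower node)))).len) else st)
    nodes (none, -1) (none, 0)
  simp only [hsplit, pvPhase1]
  generalize List.find? (fun n => PySem.Str.isIn (PySem.Str.lower n) (PySem.Str.lower query))
      (PySem.List.sorted nodes (fun node => PySem.Str.len node) true) = r
  cases r <;> rfl
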